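-- pv_equiv track=rewrite | github.com/langlois33682/kindle-highlights-sync | scraper/app/build.py | deduplicate_highlights
-- ===== SOURCE A (Python) =====
-- def deduplicate_highlights(highlights: list[dict]) -> list[dict]:
--     """Keep only the most recent highlight per book.
--
--     Args:
--         highlights: List of highlight dictionaries
--
--     Returns:
--         Deduplicated list with one highlight per book (most recent)
--     """
--     book_highlights: dict[str, dict] = {}
--
--     for hl in highlights:
--         title = hl.get("book_title", "")
--         if not title:
--             continue
--
--         existing = book_highlights.get(title)
--
--         if existing is None:
--             book_highlights[title] = hl
--         else:
--             new_time = hl.get("highlight_time") or hl.get("fetched_at")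
--             existing_time = existing.get("highlight_time") or existing.get("fetched_at")
--
--             if new_time and existing_time:
--                 if new_time > existing_time:
--                     book_highlights[title] = hl
--             elif new_time:
--                 book_highlights[title] = hl
--
--     return list(book_highlights.values())
-- ===== SOURCE B (Python) =====
-- def deduplicate_highlights(highlights: list[dict]) -> list[dict]:
--     """Keep only the most recent highlight per book (group-then-select)."""
--     groups: dict[str, list[dict]] = {}
--     for hl in highlights:
--         title = hl.get("book_title", "")
--         if not title:
--             continue
--         groups.setdefault(title, []).append(hl)
--
--     def time_of(h):
--         return h.get("highlight_time") or h.get("fetched_at")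
--
--     def pick(best, cand):
--         ct = time_of(cand)
--         bt = time_of(best)
--         return cand if ct and (not bt or ct > bt) else best
--
--     result = []
--     for group in groups.values():
--         best = group[0]
--         for cand in group[1:]:
--             best = pick(best, cand)
--         result.append(best)
--     return result
-- ===== Notes on version B (the rewrite author's own statement) =====
-- stated objective: alternative
-- what changed: B replaces A's single pass that maintains one running best highlight per title in a dict with a two-phase algorithm: group highlights into per-title lists first, then independently fold each group with the recency predicate to select one winner.
import Mathlib
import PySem

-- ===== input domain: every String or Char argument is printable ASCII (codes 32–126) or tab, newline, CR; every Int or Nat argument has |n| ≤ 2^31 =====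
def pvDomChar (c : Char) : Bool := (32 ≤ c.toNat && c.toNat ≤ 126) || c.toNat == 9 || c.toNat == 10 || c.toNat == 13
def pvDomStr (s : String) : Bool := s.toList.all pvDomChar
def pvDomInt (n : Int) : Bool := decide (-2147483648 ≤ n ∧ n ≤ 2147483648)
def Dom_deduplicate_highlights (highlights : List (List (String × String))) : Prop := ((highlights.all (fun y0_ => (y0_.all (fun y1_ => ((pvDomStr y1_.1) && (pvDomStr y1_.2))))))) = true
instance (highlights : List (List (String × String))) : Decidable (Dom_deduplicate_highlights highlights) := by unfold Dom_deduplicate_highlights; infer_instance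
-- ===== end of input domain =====

-- B keeps A's exact selection predicate but uses a different decomposition (group per title,
-- then select per group); same cost, proved to return identical values on all inputs.

-- `hl.get("highlight_time") or hl.get("fetched_at")`: None and "" are both falsy and the
-- value is only used in comparisons when truthy, so a missing key (None) is represented by "".
def hlTime (hl : List (String × String)) : String :=
  let t := (PySem.Dict.mk hl).getD "highlight_time" ""
  if t ≠ "" then t else (PySem.Dict.mk hl).getD "fetched_at" ""

-- ===== PORT A =====
-- one step of A's loop over `highlights`, maintaining the dict title → current best highlight
def dedupStep (d : PySem.Dict String (List (String × String))) (hl : List (String × String)) :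
    PySem.Dict String (List (String × String)) :=
  let title := (PySem.Dict.mk hl).getD "book_title" ""
  if title = "" then d
  else
    match d.get? title with
    | none => d.insert title hl
    | some existing =>
      let new_time := hlTime hl
      let existing_time := hlTime existing
      if new_time ≠ "" ∧ existing_time ≠ "" then
        if existing_time < new_time then d.insert title hl else d
      else if new_time ≠ "" then d.insert title hl else d

def deduplicate_highlights (highlights : List (List (String × String))) : List (List (String × String)) :=
  (highlights.foldl dedupStep PySem.Dict.empty).values

-- ===== PORT B =====
-- one step of B's grouping loop: `groups.setdefault(title, []).append(hl)`
def groupStep (g : PySem.Dict String (List (List (String × String)))) (hl : List (String × String)) :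
    PySem.Dict String (List (List (String × String))) :=
  let title := (PySem.Dict.mk hl).getD "book_title" ""
  if title = "" then g else g.modify title [] (· ++ [hl])

def pickNewer (best cand : List (String × String)) : List (String × String) :=
  let ct := hlTime cand
  let bt := hlTime best
  if ct ≠ "" ∧ (bt = "" ∨ bt < ct) then cand else best

-- best = group[0]; for cand in group[1:]: best = pick(best, cand)
def bestOf : List (List (String × String)) → List (String × String)
  | [] => []
  | h :: t => t.foldl pickNewer h

def deduplicate_highlights_alt (highlights : List (List (String × String))) : List (List (String × String)) :=
  ((highlights.foldl groupStep PySem.Dict.empty).values).map bestOf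

-- ===== PRECONDITION & SPEC =====
def Spec_deduplicate_highlights (highlights : List (List (String × String))) (out : List (List (String × String))) : Prop := out = deduplicate_highlights_alt highlights
instance (highlights : List (List (String × String))) (out : List (List (String × String))) : Decidable (Spec_deduplicate_highlights highlights out) := by unfold Spec_deduplicate_highlights; infer_instance

-- ===== CLAIM (what is proved, stated in full; the proofs are below) =====
def Claim_equal_deduplicate_highlights : Prop := ∀ (highlights : List (List (String × String))), Dom_deduplicate_highlights highlights → Spec_deduplicate_highlights highlights (deduplicate_highlights highlights)

-- ===== LEMMAS AND PROOFS =====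

-- invariant relating A's dict (title → best so far) to B's dict (title → group so far)
def DedupInv (d : PySem.Dict String (List (String × String)))
    (g : PySem.Dict String (List (List (String × String)))) : Prop :=
  d.items = g.items.map (fun p => (p.1, bestOf p.2)) ∧
  g.keys.Nodup ∧ (∀ p ∈ g.items, p.2 ≠ [])

theorem eq_of_mem_nodup_fst {α β : Type} {l : List (α × β)} (h : (l.map Prod.fst).Nodup)
    {p q : α × β} (hp : p ∈ l) (hq : q ∈ l) (he : p.1 = q.1) : p = q := by
  induction l with
  | nil => cases hp
  | cons a t ih =>
    rw [List.map_cons, List.nodup_cons] at h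
    rcases List.mem_cons.1 hp with rfl | hp'
    · rcases List.mem_cons.1 hq with rfl | hq'
      · rfl
      · exact absurd (List.mem_map.2 ⟨q, hq', he.symm⟩) h.1
    · rcases List.mem_cons.1 hq with rfl | hq'
      · exact absurd (List.mem_map.2 ⟨p, hp', he⟩) h.1
      · exact ih h.2 hp' hq'

theorem keys_eq_of_inv {d : PySem.Dict String (List (String × String))}
    {g : PySem.Dict String (List (List (String × String)))} (h : DedupInv d g) : d.keys = g.keys := by
  show d.items.map Prod.fst = g.items.map Prod.fst
  rw [h.1, List.map_map]; rfl

theorem bestOf_append_singleton (grp : List (List (String × String)))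
    (hne : grp ≠ []) (hl : List (String × String)) :
    bestOf (grp ++ [hl]) = pickNewer (bestOf grp) hl := by
  cases grp with
  | nil => exact absurd rfl hne
  | cons h t => simp [bestOf, List.foldl_append]

theorem dedupStep_none (d : PySem.Dict String (List (String × String)))
    (hl : List (String × String)) (title : String) (ht : ¬ title = "")
    (hti : (PySem.Dict.mk hl).getD "book_title" "" = title)
    (hd : d.get? title = none) : dedupStep d hl = d.insert title hl := by
  unfold dedupStep
  rw [hti, if_neg ht, hd]

theorem dedupStep_some (d : PySem.Dict String (List (String × String)))
    (hl : List (String × String)) (title : String) (ht : ¬ title = "")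
    (hti : (PySem.Dict.mk hl).getD "book_title" "" = title)
    (b : List (String × String)) (hd : d.get? title = some b) :
    dedupStep d hl =
      if hlTime hl ≠ "" ∧ (hlTime b = "" ∨ hlTime b < hlTime hl) then d.insert title hl else d := by
  unfold dedupStep
  rw [hti, if_neg ht, hd]
  by_cases h1 : hlTime hl = "" <;> by_cases h2 : hlTime b = "" <;>
    by_cases h3 : hlTime b < hlTime hl <;> simp [h1, h2, h3]

theorem inv_step (d : PySem.Dict String (List (String × String)))
    (g : PySem.Dict String (List (List (String × String)))) (hl : List (String × String))
    (h : DedupInv d g) : DedupInv (dedupStep d hl) (groupStep g hl) := by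
  obtain ⟨hitems, hnd, hne⟩ := h
  have hkeys : d.keys = g.keys := keys_eq_of_inv ⟨hitems, hnd, hne⟩
  by_cases ht : (PySem.Dict.mk hl).getD "book_title" "" = ""
  · unfold dedupStep groupStep
    rw [ht]
    simp only [reduceIte]
    exact ⟨hitems, hnd, hne⟩
  · set title := (PySem.Dict.mk hl).getD "book_title" "" with htitle
    have hgs : groupStep g hl = g.modify title [] (· ++ [hl]) := by
      unfold groupStep; rw [← htitle, if_neg ht]
    by_cases hmem : title ∈ g.keys
    · -- existing group: A has some best, B appends to the group
      have hgson : g.get? title ≠ none := by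
        simp [PySem.Dict.get?_eq_none_iff_not_mem_keys, hmem]
      obtain ⟨grp, hget⟩ : ∃ v, g.get? title = some v := by
        cases hg : g.get? title with
        | none => exact absurd hg hgson
        | some v => exact ⟨v, rfl⟩
      have hgmem : (title, grp) ∈ g.items :=
        (PySem.Dict.get?_eq_some_iff_mem_items g title grp hnd).1 hget
      have hgrpne : grp ≠ [] := hne _ hgmem
      have hdnd : d.keys.Nodup := hkeys ▸ hnd
      have hdget : d.get? title = some (bestOf grp) := by
        refine (PySem.Dict.get?_eq_some_iff_mem_items d title _ hdnd).2 ?_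
        rw [hitems]; exact List.mem_map_of_mem hgmem
      have hgc : g.contains title = true := (PySem.Dict.contains_iff_mem_keys g title).2 hmem
      have hdc : d.contains title = true := by
        rw [PySem.Dict.contains_iff_mem_keys, hkeys]; exact hmem
      -- B's step is an overwrite of the group at `title`
      have hmod : g.modify title [] (· ++ [hl]) = g.insert title (grp ++ [hl]) := by
        show g.insert title (g.getD title [] ++ [hl]) = _
        rw [PySem.Dict.getD_of_get?_eq_some g [] hget]
      rw [hgs, hmod, dedupStep_some d hl title ht rfl (bestOf grp) hdget]
      have hbitems := PySem.Dict.items_insert_of_contains g (grp ++ [hl]) hgc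
      have hone : ∀ p ∈ g.items, ((p.1 == title) = true) → p = (title, grp) := by
        intro p hp hpt
        exact eq_of_mem_nodup_fst hnd hp hgmem (by simpa using hpt)
      have hpick : pickNewer (bestOf grp) hl =
          if hlTime hl ≠ "" ∧ (hlTime (bestOf grp) = "" ∨ hlTime (bestOf grp) < hlTime hl)
          then hl else bestOf grp := rfl
      refine ⟨?_, ?_, ?_⟩
      · -- items relation
        rw [hbitems, List.map_map]
        by_cases hc : hlTime hl ≠ "" ∧ (hlTime (bestOf grp) = "" ∨ hlTime (bestOf grp) < hlTime hl)
        · rw [if_pos hc, PySem.Dict.items_insert_of_contains d hl hdc, hitems, List.map_map]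
          refine List.map_congr_left (fun p hp => ?_)
          by_cases hpt : (p.1 == title) = true
          · have := hone p hp hpt
            subst this
            simp only [Function.comp_apply, hpt, if_true,
              bestOf_append_singleton grp hgrpne hl, hpick]
            rw [if_pos hc]
          · simp [Function.comp, hpt]
        · rw [if_neg hc, hitems]
          refine (List.map_congr_left (fun p hp => ?_)).symm
          by_cases hpt : (p.1 == title) = true
          · have := hone p hp hpt
            subst this
            simp only [Function.comp_apply, hpt, if_true,
              bestOf_append_singleton grp hgrpne hl, hpick]
            rw [if_neg hc]
          · simp [Function.comp, hpt]
      · exact PySem.Dict.nodup_keys_insert g title (grp ++ [hl]) hnd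
      · intro p hp
        rw [PySem.Dict.mem_items_insert] at hp
        rcases hp with hp1 | hp1
        · subst hp1; simp
        · exact hne _ hp1.1
    · -- fresh title: both sides append
      have hgc : g.contains title = false := by
        rw [PySem.Dict.contains_eq_decide_mem_keys]; simpa using hmem
      have hdget : d.get? title = none := by
        rw [PySem.Dict.get?_eq_none_iff_not_mem_keys, hkeys]; exact hmem
      have hdc : d.contains title = false := by
        rw [PySem.Dict.contains_eq_decide_mem_keys, hkeys]; simpa using hmem
      have hmod : g.modify title [] (· ++ [hl]) = g.insert title [hl] := by
        show g.insert title (g.getD title [] ++ [hl]) = _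
        rw [PySem.Dict.getD_of_not_contains g [] hgc]; rfl
      rw [hgs, hmod, dedupStep_none d hl title ht rfl hdget]
      refine ⟨?_, ?_, ?_⟩
      · rw [PySem.Dict.items_insert_of_not_contains d hl hdc,
            PySem.Dict.items_insert_of_not_contains g [hl] hgc, List.map_append, hitems]
        rfl
      · exact PySem.Dict.nodup_keys_insert g title [hl] hnd
      · intro p hp
        rw [PySem.Dict.mem_items_insert] at hp
        rcases hp with hp1 | hp1
        · subst hp1; simp
        · exact hne _ hp1.1

theorem inv_foldl (hs : List (List (String × String)))
    (d : PySem.Dict String (List (String × String)))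
    (g : PySem.Dict String (List (List (String × String))))
    (h : DedupInv d g) : DedupInv (hs.foldl dedupStep d) (hs.foldl groupStep g) := by
  induction hs generalizing d g with
  | nil => exact h
  | cons x t ih => exact ih _ _ (inv_step d g x h)

-- ===== VERDICT (by name: the statement is the Claim_ definition above) =====
theorem deduplicate_highlights_spec : Claim_equal_deduplicate_highlights := by
  intro hs _
  show deduplicate_highlights hs = deduplicate_highlights_alt hs
  have h := inv_foldl hs PySem.Dict.empty PySem.Dict.empty ⟨rfl, List.nodup_nil, by intro p hp; cases hp⟩
  unfold deduplicate_highlights deduplicate_highlights_alt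
  simp only [PySem.Dict.values, h.1, List.map_map]
  exact List.map_congr_left (fun p _ => rfl)
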